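-- pv_equiv track=rewrite | github.com/dividor/evidencelab | pipeline/processors/parsing/toc_roman.py | _resolve_front_run_end
-- ===== SOURCE A (Python) =====
-- from typing import Any, Dict, List, Optional, Tuple
--
-- def _resolve_front_run_end(roman_entries: List[Tuple[int, int]]) -> Optional[int]:
--     if not roman_entries:
--         return None
--     runs: List[Tuple[int, int, int]] = []
--     run_start = roman_entries[0][0]
--     run_end = roman_entries[0][0]
--     run_len = 1
--     prev_value = roman_entries[0][1]
--     for page, value in roman_entries[1:]:
--         if value == 1 and prev_value > 1:
--             runs.append((run_len, run_start, run_end))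
--             break
--         if value < prev_value:
--             runs.append((run_len, run_start, run_end))
--             run_start = page
--             run_end = page
--             run_len = 1
--             prev_value = value
--             continue
--         run_end = page
--         run_len += 1
--         prev_value = value
--     else:
--         runs.append((run_len, run_start, run_end))
--
--     long_runs = [run for run in runs if run[0] >= 3]
--     if not long_runs:
--         return None
--     _, _, roman_end = long_runs[-1]
--     return roman_end
-- ===== SOURCE B (Python) =====
-- from typing import List, Optional, Tuple
--
-- def _resolve_front_run_end(roman_entries: List[Tuple[int, int]]) -> Optional[int]:
--     if not roman_entries:
--         return None
--     last_long_end: Optional[int] = None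
--     run_start = roman_entries[0][0]
--     run_end = roman_entries[0][0]
--     run_len = 1
--     prev_value = roman_entries[0][1]
--     for page, value in roman_entries[1:]:
--         if value == 1 and prev_value > 1:
--             break
--         if value < prev_value:
--             if run_len >= 3:
--                 last_long_end = run_end
--             run_start = page
--             run_end = page
--             run_len = 1
--             prev_value = value
--             continue
--         run_end = page
--         run_len += 1
--         prev_value = value
--     if run_len >= 3:
--         last_long_end = run_end
--     return last_long_end
-- ===== Notes on version B (the rewrite author's own statement) =====
-- stated objective: simpler
-- what changed: Single pass keeping only one Optional last_long_end updated whenever a run closes, instead of accumulating a runs list, filtering it for length >= 3 and taking the last element.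
import Mathlib
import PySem

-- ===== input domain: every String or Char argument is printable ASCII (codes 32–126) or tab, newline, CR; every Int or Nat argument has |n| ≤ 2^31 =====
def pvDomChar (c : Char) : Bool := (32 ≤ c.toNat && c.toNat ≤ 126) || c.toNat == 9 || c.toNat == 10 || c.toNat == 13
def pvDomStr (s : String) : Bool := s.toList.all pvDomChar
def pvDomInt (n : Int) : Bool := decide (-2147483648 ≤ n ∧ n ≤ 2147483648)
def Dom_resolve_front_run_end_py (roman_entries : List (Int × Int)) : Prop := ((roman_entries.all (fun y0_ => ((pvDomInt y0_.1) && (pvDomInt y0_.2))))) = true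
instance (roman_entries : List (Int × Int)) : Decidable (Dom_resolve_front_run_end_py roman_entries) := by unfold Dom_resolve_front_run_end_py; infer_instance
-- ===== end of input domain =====

-- B folds the "filter runs, take last" post-pass of A into the single scan, keeping only one
-- Option Int (last long run's end) instead of accumulating a runs list; objective: simpler.

-- ===== PORT A =====
-- A's for-loop over roman_entries[1:] with state (runs, run_start, run_end, run_len, prev_value);
-- the `for/else` appends the trailing run only when no break occurred, the break branch appends first.
def aLoop : List (Int × Int) → List (Int × Int × Int) → Int → Int → Int → Int → List (Int × Int × Int)
  | [], runs, run_start, run_end, run_len, _ => runs ++ [(run_len, run_start, run_end)]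
  | (page, value) :: rest, runs, run_start, run_end, run_len, prev_value =>
    if value = 1 ∧ prev_value > 1 then runs ++ [(run_len, run_start, run_end)]
    else if value < prev_value then
      aLoop rest (runs ++ [(run_len, run_start, run_end)]) page page 1 value
    else
      aLoop rest runs run_start page (run_len + 1) value

def resolve_front_run_end_py (roman_entries : List (Int × Int)) : Option Int :=
  match roman_entries with
  | [] => none
  | (p0, v0) :: rest =>
    let runs := aLoop rest [] p0 p0 1 v0
    let long_runs := runs.filter (fun r => decide (r.1 ≥ 3))
    match long_runs.getLast? with      -- `if not long_runs: return None` then `long_runs[-1]`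
    | none => none
    | some (_, _, roman_end) => some roman_end

-- ===== PORT B =====
-- B's loop: same break/new-run/extend branches, but closing a run just updates last_long_end.
def bLoop : List (Int × Int) → Option Int → Int → Int → Int → Int → Option Int
  | [], lle, _, run_end, run_len, _ => if run_len ≥ 3 then some run_end else lle
  | (page, value) :: rest, lle, run_start, run_end, run_len, prev_value =>
    if value = 1 ∧ prev_value > 1 then (if run_len ≥ 3 then some run_end else lle)
    else if value < prev_value then
      bLoop rest (if run_len ≥ 3 then some run_end else lle) page page 1 value
    else
      bLoop rest lle run_start page (run_len + 1) value

def resolve_front_run_end_py_alt (roman_entries : List (Int × Int)) : Option Int :=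
  match roman_entries with
  | [] => none
  | (p0, v0) :: rest => bLoop rest none p0 p0 1 v0

-- ===== PRECONDITION & SPEC =====
def Spec_resolve_front_run_end_py (roman_entries : List (Int × Int)) (out : Option Int) : Prop := out = resolve_front_run_end_py_alt roman_entries
instance (roman_entries : List (Int × Int)) (out : Option Int) : Decidable (Spec_resolve_front_run_end_py roman_entries out) := by unfold Spec_resolve_front_run_end_py; infer_instance

-- ===== CLAIM (what is proved, stated in full; the proofs are below) =====
def Claim_equal_resolve_front_run_end_py : Prop := ∀ (roman_entries : List (Int × Int)), Dom_resolve_front_run_end_py roman_entries → Spec_resolve_front_run_end_py roman_entries (resolve_front_run_end_py roman_entries)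

-- ===== LEMMAS AND PROOFS =====

-- abstraction of A's post-pass applied to a runs accumulator
def lastLong (runs : List (Int × Int × Int)) : Option Int :=
  (runs.filter (fun r => decide (r.1 ≥ 3))).getLast?.map (fun r => r.2.2)

theorem lastLong_snoc (runs : List (Int × Int × Int)) (rl rs re : Int) :
    lastLong (runs ++ [(rl, rs, re)]) = if rl ≥ 3 then some re else lastLong runs := by
  unfold lastLong
  by_cases h : rl ≥ 3 <;> simp [List.filter_append, h, List.getLast?_append]

theorem bLoop_eq_lastLong (rest : List (Int × Int)) :
    ∀ (runs : List (Int × Int × Int)) (lle : Option Int) (rs re rl pv : Int),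
      lle = lastLong runs →
      bLoop rest lle rs re rl pv = lastLong (aLoop rest runs rs re rl pv) := by
  induction rest with
  | nil =>
    intro runs lle rs re rl pv h
    simp [bLoop, aLoop, lastLong_snoc, h]
  | cons hd tl ih =>
    intro runs lle rs re rl pv h
    obtain ⟨page, value⟩ := hd
    by_cases h1 : value = 1 ∧ pv > 1
    · simp [bLoop, aLoop, h1, lastLong_snoc, h]
    · by_cases h2 : value < pv
      · simp only [bLoop, aLoop, if_neg h1, if_pos h2]
        exact ih _ _ _ _ _ _ (by rw [lastLong_snoc, h])
      · simp only [bLoop, aLoop, if_neg h1, if_neg h2]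
        exact ih _ _ _ _ _ _ h

-- ===== VERDICT (by name: the statement is the Claim_ definition above) =====
theorem resolve_front_run_end_py_spec : Claim_equal_resolve_front_run_end_py := by
  intro roman_entries _
  unfold Spec_resolve_front_run_end_py
  match roman_entries with
  | [] => rfl
  | (p0, v0) :: rest =>
    simp only [resolve_front_run_end_py, resolve_front_run_end_py_alt]
    rw [bLoop_eq_lastLong rest [] none p0 p0 1 v0 rfl]
    unfold lastLong
    cases (aLoop rest [] p0 p0 1 v0).filter (fun r => decide (r.1 ≥ 3)) |>.getLast? with
    | none => simp
    | some r => obtain ⟨a, b, c⟩ := r; simp
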